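-- pv_equiv track=rewrite | github.com/D1scak3/TP_AA1 | main.py | maximum_matching
-- ===== SOURCE A (Python) =====
-- def maximum_matching(comb_arestas):
--     pontos = []
--
--     for aresta in comb_arestas:
--         for ponto in aresta:
--             pontos.append(ponto)
--
--     # O(n) -> transformar lista para set
--     if len(pontos) - len(set(pontos)) == 0:  # não há ligações (BEST CASE!!!)
--         return comb_arestas
--     return None  # há ligações (ignora...)
-- ===== SOURCE B (Python) =====
-- def maximum_matching(comb_arestas):
--     pontos = sorted(p for aresta in comb_arestas for p in aresta)
--     for x, y in zip(pontos, pontos[1:]):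
--         if x == y:
--             return None
--     return comb_arestas
-- ===== Notes on version B (the rewrite author's own statement) =====
-- stated objective: alternative
-- what changed: Replaces A's 'flatten all endpoints then compare list length with set length' by a sort-then-scan: sort the endpoints, then a duplicate endpoint exists iff two adjacent sorted values are equal, detected in one zip pass.
import Mathlib
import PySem

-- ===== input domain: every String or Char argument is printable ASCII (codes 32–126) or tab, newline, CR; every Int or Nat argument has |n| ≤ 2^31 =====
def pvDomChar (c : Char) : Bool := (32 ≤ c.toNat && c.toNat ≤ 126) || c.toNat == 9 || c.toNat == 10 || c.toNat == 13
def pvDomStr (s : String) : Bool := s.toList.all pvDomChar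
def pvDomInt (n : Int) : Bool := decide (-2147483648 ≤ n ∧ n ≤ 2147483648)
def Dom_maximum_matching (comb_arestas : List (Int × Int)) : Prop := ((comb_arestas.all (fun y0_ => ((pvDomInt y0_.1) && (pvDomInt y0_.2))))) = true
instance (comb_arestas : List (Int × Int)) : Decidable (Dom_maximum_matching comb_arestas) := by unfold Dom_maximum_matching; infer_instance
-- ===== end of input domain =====

-- B replaces A's 'flatten endpoints, then compare list length with set length' by a
-- sort-then-scan: sort the endpoints and look for an equal adjacent pair (objective: alternative).

-- ===== PORT A =====
def maximum_matching (comb_arestas : List (Int × Int)) : Option (List (Int × Int)) :=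
  -- pontos = []; for aresta in comb_arestas: for ponto in aresta: pontos.append(ponto)
  let pontos : List Int := comb_arestas.foldl (fun acc aresta => acc ++ [aresta.1, aresta.2]) []
  -- if len(pontos) - len(set(pontos)) == 0: return comb_arestas; return None
  if ((pontos.length : Int) - ((PySem.Set.ofList pontos).length : Int)) = 0 then
    some comb_arestas
  else
    none

-- ===== PORT B =====
-- the 'for x, y in zip(pontos, pontos[1:]): if x == y: return None' loop of Source B
def mmAdjScan (comb_arestas : List (Int × Int)) :
    List (Int × Int) → Option (List (Int × Int))
  | [] => some comb_arestas
  | (x, y) :: rest => if x = y then none else mmAdjScan comb_arestas rest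

def maximum_matching_alt (comb_arestas : List (Int × Int)) : Option (List (Int × Int)) :=
  -- pontos = sorted(p for aresta in comb_arestas for p in aresta)
  let pontos : List Int :=
    PySem.List.sorted (comb_arestas.flatMap (fun aresta => [aresta.1, aresta.2])) (fun x => x) false
  -- zip(pontos, pontos[1:]); pontos[1:] is List.drop 1 (exact: slice with nonnegative start)
  mmAdjScan comb_arestas (pontos.zip (pontos.drop 1))

-- ===== PRECONDITION & SPEC =====
def Spec_maximum_matching (comb_arestas : List (Int × Int)) (out : Option (List (Int × Int))) : Prop := out = maximum_matching_alt comb_arestas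
instance (comb_arestas : List (Int × Int)) (out : Option (List (Int × Int))) : Decidable (Spec_maximum_matching comb_arestas out) := by unfold Spec_maximum_matching; infer_instance

-- ===== CLAIM (what is proved, stated in full; the proofs are below) =====
def Claim_equal_maximum_matching : Prop := ∀ (comb_arestas : List (Int × Int)), Dom_maximum_matching comb_arestas → Spec_maximum_matching comb_arestas (maximum_matching comb_arestas)

-- ===== LEMMAS AND PROOFS =====

-- length of Set.add grows by one exactly on a fresh element
theorem pv_len_add (s : PySem.Set Int) (x : Int) :
    (PySem.Set.add s x).length = if x ∈ s then s.length else s.length + 1 := by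
  simp [PySem.Set.add, PySem.Set.contains]
  split_ifs <;> simp_all

-- |set(xs)| = |xs| exactly when xs has no duplicates
theorem pv_len_ofList_eq_iff (xs : List Int) :
    (PySem.Set.ofList xs).length = xs.length ↔ xs.Nodup := by
  induction xs using List.reverseRecOn with
  | nil => simp [PySem.Set.ofList]
  | append_singleton t x ih =>
    rw [PySem.Set.ofList_append_singleton, pv_len_add]
    have hle := PySem.Set.length_ofList_le (xs := t)
    by_cases hx : x ∈ PySem.Set.ofList t
    · have hxt : x ∈ t := (PySem.Set.mem_ofList t x).1 hx
      simp only [if_pos hx, List.length_append, List.length_cons, List.length_nil]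
      constructor
      · intro h; omega
      · intro h
        have hd := (List.nodup_append.1 h).2.2
        exact absurd (hd x hxt) (by simp)
    · have hxt : x ∉ t := fun h => hx ((PySem.Set.mem_ofList t x).2 h)
      simp only [if_neg hx, List.length_append, List.length_cons, List.length_nil]
      rw [List.nodup_append]
      constructor
      · intro h
        refine ⟨ih.1 (by omega), List.nodup_singleton x, ?_⟩
        intro a ha b hb
        rw [List.mem_singleton] at hb
        intro hab
        rw [hb] at hab
        rw [hab] at ha
        exact hxt ha
      · rintro ⟨h, -, -⟩
        have := ih.2 h
        omega

-- on a ≤-sorted list, the adjacent scan succeeds exactly when the list has no duplicates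
theorem pv_adjScan_eq (comb : List (Int × Int)) :
    ∀ (s : List Int), s.Pairwise (· ≤ ·) →
      mmAdjScan comb (s.zip (s.drop 1)) = if s.Nodup then some comb else none := by
  intro s
  induction s with
  | nil => intro _; simp [mmAdjScan]
  | cons x t ih =>
    intro hp
    cases t with
    | nil => simp [mmAdjScan]
    | cons y u =>
      have hp' : (y :: u).Pairwise (· ≤ ·) := hp.of_cons
      have hxy : x ≤ y := (List.pairwise_cons.1 hp).1 y (by simp)
      have hall : ∀ z ∈ y :: u, x ≤ z := (List.pairwise_cons.1 hp).1
      simp only [List.drop_succ_cons, List.drop_zero, List.zip_cons_cons, mmAdjScan]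
      by_cases hxey : x = y
      · rw [if_pos hxey]
        have : ¬ (x :: y :: u).Nodup := by
          intro h
          exact (List.nodup_cons.1 h).1 (by simp [hxey])
        rw [if_neg this]
      · rw [if_neg hxey]
        have hrec := ih hp'
        have hdrop : (y :: u).drop 1 = u := by simp
        rw [hdrop] at hrec
        rw [hrec]
        have hnmem : x ∉ y :: u := by
          intro hmem
          rcases List.mem_cons.1 hmem with h | h
          · exact hxey h
          · have hyu : y ≤ x := by
              have hpy := (List.pairwise_cons.1 hp').1
              exact hpy x h
            exact hxey (le_antisymm hxy hyu)
        have : (x :: y :: u).Nodup ↔ (y :: u).Nodup := by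
          rw [List.nodup_cons]; exact ⟨fun h => h.2, fun h => ⟨hnmem, h⟩⟩
        rw [if_congr this rfl rfl]

-- ===== VERDICT (by name: the statement is the Claim_ definition above) =====
theorem maximum_matching_spec : Claim_equal_maximum_matching := by
  intro comb _
  unfold Spec_maximum_matching maximum_matching maximum_matching_alt
  have hfl : comb.foldl (fun acc aresta => acc ++ [aresta.1, aresta.2]) []
      = comb.flatMap (fun p => [p.1, p.2]) := by
    simpa using PySem.List.foldl_append_eq_flatMap (fun (p : Int × Int) => [p.1, p.2]) comb []
  set L := comb.flatMap (fun p => [p.1, p.2]) with hL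
  set s := PySem.List.sorted L (fun x => x) false with hs
  have hpw : s.Pairwise (· ≤ ·) := by
    have := PySem.List.sorted_pairwise (xs := L) (key := fun x => x)
    simpa [hs] using this
  have hperm : s.Perm L := PySem.List.sorted_perm L _ _
  rw [pv_adjScan_eq comb s hpw]
  simp only [hfl]
  have hle := PySem.Set.length_ofList_le (xs := L)
  have hnd : s.Nodup ↔ L.Nodup := hperm.nodup_iff
  by_cases h : L.Nodup
  · have he : (PySem.Set.ofList L).length = L.length := (pv_len_ofList_eq_iff L).2 h
    have hz : ((L.length : Int) - ((PySem.Set.ofList L).length : Int)) = 0 := by rw [he]; ring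
    rw [if_pos hz, if_pos (hnd.2 h)]
  · have hne : (PySem.Set.ofList L).length ≠ L.length := fun he => h ((pv_len_ofList_eq_iff L).1 he)
    have hz : ¬ (((L.length : Int) - ((PySem.Set.ofList L).length : Int)) = 0) := by
      intro hz; exact hne (by omega)
    rw [if_neg hz, if_neg (fun hn => h (hnd.1 hn))]
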